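-- pv_equiv track=rewrite | github.com/karlisstigis/houdini_simple_render_manager | queue_path_sync_lock.py | end_path_sync_lock
-- ===== SOURCE A (Python) =====
-- def normalize_path_sync_job_ids(job_ids: list[str]) -> list[str]:
--     return [str(job_id or "").strip() for job_id in job_ids if str(job_id or "").strip()]
--
-- def end_path_sync_lock(lock_counts: dict[str, int], job_ids: list[str]) -> tuple[list[str], bool]:
--     locked_ids = normalize_path_sync_job_ids(job_ids)
--     if not locked_ids:
--         return [], False
--     changed_ids: list[str] = []
--     for job_id in locked_ids:
--         count = int(lock_counts.get(job_id, 0))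
--         if count <= 1:
--             lock_counts.pop(job_id, None)
--         else:
--             lock_counts[job_id] = count - 1
--         changed_ids.append(job_id)
--     stopped_overlay = not lock_counts
--     return changed_ids, stopped_overlay
-- ===== SOURCE B (Python) =====
-- def normalize_path_sync_job_ids(job_ids):
--     return [str(job_id or "").strip() for job_id in job_ids if str(job_id or "").strip()]
--
--
-- def end_path_sync_lock(lock_counts, job_ids):
--     locked_ids = normalize_path_sync_job_ids(job_ids)
--     if not locked_ids:
--         return [], False
--     occ = {}
--     for job_id in locked_ids:
--         occ[job_id] = occ.get(job_id, 0) + 1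
--     new_counts = {}
--     for k, v in lock_counts.items():
--         m = occ.get(k, 0)
--         c = int(v)
--         if m == 0:
--             new_counts[k] = c
--         elif m < c:
--             new_counts[k] = c - m
--     lock_counts.clear()
--     lock_counts.update(new_counts)
--     return locked_ids, not new_counts
-- ===== Notes on version B (the rewrite author's own statement) =====
-- stated objective: alternative
-- what changed: B inverts the traversal: instead of walking locked_ids and decrementing/popping lock_counts once per id, it counts occurrences of the normalized ids once, then makes one pass over lock_counts.items() computing each key's survival directly (drop if 0 < m and c <= m, keep c - m otherwise) into a rebuilt dict, and returns the normalized list itself as changed_ids.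
import Mathlib
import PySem

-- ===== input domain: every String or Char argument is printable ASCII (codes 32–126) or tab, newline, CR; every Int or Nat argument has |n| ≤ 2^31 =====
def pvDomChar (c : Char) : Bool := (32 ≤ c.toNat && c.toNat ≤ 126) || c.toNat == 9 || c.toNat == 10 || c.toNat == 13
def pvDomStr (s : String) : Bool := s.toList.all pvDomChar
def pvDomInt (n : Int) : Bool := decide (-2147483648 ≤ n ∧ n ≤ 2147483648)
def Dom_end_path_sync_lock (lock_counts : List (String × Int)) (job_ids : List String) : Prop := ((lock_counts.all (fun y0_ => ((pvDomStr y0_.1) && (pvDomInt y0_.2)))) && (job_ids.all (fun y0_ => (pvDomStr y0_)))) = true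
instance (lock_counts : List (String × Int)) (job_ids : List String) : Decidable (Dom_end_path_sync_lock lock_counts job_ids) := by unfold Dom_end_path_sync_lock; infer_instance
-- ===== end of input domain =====

-- B inverts the traversal: one pass over lock_counts.items() computing each key's survival from
-- locked_ids.count(k), rebuilding the dict (alternative decomposition, same return value; both
-- Pythons also leave lock_counts in the same final state).


-- ===== PORT A =====
-- helper shared by both Pythons (Source B contains the identical function)
def normalize_path_sync_job_ids (job_ids : List String) : List String :=
  (job_ids.filter (fun job_id => PySem.Str.strip (if job_id ≠ "" then job_id else "") ≠ "")).map
    (fun job_id => PySem.Str.strip (if job_id ≠ "" then job_id else ""))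

def end_path_sync_lock (lock_counts : List (String × Int)) (job_ids : List String) : List String × Bool :=
  let locked_ids := normalize_path_sync_job_ids job_ids
  if locked_ids = [] then ([], false)
  else
    let st := locked_ids.foldl (fun (st : PySem.Dict String Int × List String) job_id =>
      (let count := st.1.getD job_id 0
       if count ≤ 1 then
         match st.1.pop? job_id with            -- lock_counts.pop(job_id, None)
         | some (_, d') => d'
         | none => st.1
       else st.1.insert job_id (count - 1),
       st.2 ++ [job_id])) (PySem.Dict.mk lock_counts, [])
    (st.2, decide (st.1.size = 0))              -- stopped_overlay = not lock_counts

-- ===== PORT B =====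
def end_path_sync_lock_alt (lock_counts : List (String × Int)) (job_ids : List String) : List String × Bool :=
  let locked_ids := normalize_path_sync_job_ids job_ids
  if locked_ids = [] then ([], false)
  else
    let occ : PySem.Dict String Int :=
      locked_ids.foldl (fun d x => d.insert x (d.getD x 0 + 1)) PySem.Dict.empty
    let new_counts := (PySem.Dict.mk lock_counts).items.foldl
      (fun (nc : PySem.Dict String Int) kv =>
        let m : Int := occ.getD kv.1 0
        let c : Int := kv.2
        if m = 0 then nc.insert kv.1 c
        else if m < c then nc.insert kv.1 (c - m)
        else nc) PySem.Dict.empty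
    (locked_ids, decide (new_counts.size = 0))  -- not new_counts

-- ===== PRECONDITION & SPEC =====
-- Pre_ excludes association lists with duplicate keys: they cannot arise from the Python
-- parameter, which is a dict[str, int] (a dict has unique keys).
def Pre_end_path_sync_lock (lock_counts : List (String × Int)) (job_ids : List String) : Prop :=
  (lock_counts.map Prod.fst).Nodup
instance (lock_counts : List (String × Int)) (job_ids : List String) : Decidable (Pre_end_path_sync_lock lock_counts job_ids) := by unfold Pre_end_path_sync_lock; infer_instance
def pvWitness_end_path_sync_lock : (List (String × Int)) × List String := ([("a", 2), ("b", 1)], ["a", " a ", "c"])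

def Spec_end_path_sync_lock (lock_counts : List (String × Int)) (job_ids : List String) (out : List String × Bool) : Prop := out = end_path_sync_lock_alt lock_counts job_ids
instance (lock_counts : List (String × Int)) (job_ids : List String) (out : List String × Bool) : Decidable (Spec_end_path_sync_lock lock_counts job_ids out) := by unfold Spec_end_path_sync_lock; infer_instance

-- ===== CLAIM (what is proved, stated in full; the proofs are below) =====
def Claim_equal_end_path_sync_lock : Prop := ∀ (lock_counts : List (String × Int)) (job_ids : List String), Dom_end_path_sync_lock lock_counts job_ids → Pre_end_path_sync_lock lock_counts job_ids → Spec_end_path_sync_lock lock_counts job_ids (end_path_sync_lock lock_counts job_ids)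

-- ===== LEMMAS AND PROOFS =====

theorem find?_filter_ne (l : List (String × Int)) (x k : String) (hk : k ≠ x) :
    (l.filter (fun p => !(p.1 == x))).find? (fun p => p.1 == k) = l.find? (fun p => p.1 == k) := by
  induction l with
  | nil => rfl
  | cons h t ih =>
    by_cases hx : h.1 = x
    · simp [List.filter_cons, hx, Ne.symm hk, ih]
    · by_cases hkk : h.1 = k
      · simp [List.filter_cons, hx, hkk, hk]
      · simp [List.filter_cons, hx, hkk, ih]

theorem get?_erase (d : PySem.Dict String Int) (x k : String) :
    (d.erase x).get? k = if k = x then none else d.get? k := by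
  by_cases h : k = x
  · subst h
    simp only [if_pos rfl, PySem.Dict.get?, PySem.Dict.erase]
    rw [List.find?_eq_none.mpr]
    · rfl
    · intro p hp
      simp only [List.mem_filter] at hp
      simpa using hp.2
  · simp only [if_neg h, PySem.Dict.get?, PySem.Dict.erase]
    rw [find?_filter_ne _ _ _ h]

theorem getD_erase (d : PySem.Dict String Int) (x k : String) (v : Int) :
    (d.erase x).getD k v = if k = x then v else d.getD k v := by
  simp only [PySem.Dict.getD, get?_erase]
  split_ifs <;> rfl

def stepGrp (d : PySem.Dict String Int) (k : String) (m : Int) : PySem.Dict String Int :=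
  if d.getD k 0 ≤ m then d.erase k else d.insert k (d.getD k 0 - m)

theorem contains_of_getD_pos (d : PySem.Dict String Int) (k : String) (h : 1 ≤ d.getD k 0) :
    d.contains k = true := by
  by_cases hc : d.contains k
  · exact hc
  · rw [PySem.Dict.getD_of_not_contains d 0 (by simpa using hc)] at h
    omega

def entryF (d : PySem.Dict String Int) (xs : List String) (p : String × Int) : Option (String × Int) :=
  if xs.count p.1 = 0 then some p
  else if d.getD p.1 0 ≤ (xs.count p.1 : Int) then none
  else some (p.1, d.getD p.1 0 - (xs.count p.1 : Int))

theorem seq_char (xs : List String) (d : PySem.Dict String Int) :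
    xs.foldl (fun d k => stepGrp d k 1) d = ⟨d.items.filterMap (entryF d xs)⟩ := by
  induction xs generalizing d with
  | nil =>
    cases d with
    | mk items => simp [entryF, List.filterMap_some]
  | cons x t ih =>
    simp only [List.foldl_cons]
    rw [ih]
    apply PySem.Dict.ext
    show (stepGrp d x 1).items.filterMap (entryF (stepGrp d x 1) t)
        = d.items.filterMap (entryF d (x :: t))
    by_cases hc : d.getD x 0 ≤ 1
    · have hstep : stepGrp d x 1 = d.erase x := by rw [stepGrp, if_pos hc]
      rw [hstep]
      show (d.items.filter (fun p => !(p.1 == x))).filterMap (entryF (d.erase x) t)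
        = d.items.filterMap (entryF d (x :: t))
      rw [List.filterMap_filter]
      apply List.filterMap_congr
      intro p _
      by_cases hpk : p.1 = x
      · simp only [entryF, hpk, beq_self_eq_true, Bool.not_true, Bool.false_eq_true,
          if_false, List.count_cons_self]
        rw [if_neg (by omega), if_pos (by push_cast; omega)]
      · have hcnt : (x :: t).count p.1 = t.count p.1 := by
          simp [List.count_cons, Ne.symm hpk]
        simp only [entryF, getD_erase, if_neg hpk, hcnt]
        simp [hpk]
    · have hcont : d.contains x = true := contains_of_getD_pos d x (by omega)
      have hstep : stepGrp d x 1 = d.insert x (d.getD x 0 - 1) := by rw [stepGrp, if_neg hc]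
      rw [hstep, PySem.Dict.items_insert_of_contains d _ hcont, List.filterMap_map]
      apply List.filterMap_congr
      intro p _
      by_cases hpk : p.1 = x
      · simp only [Function.comp_apply, hpk, beq_self_eq_true, if_true, entryF,
          PySem.Dict.getD_insert_self, List.count_cons_self]
        by_cases hm : t.count x = 0
        · rw [if_pos hm, if_neg (by omega), if_neg (by rw [hm]; push_cast; omega)]
          rw [hm]; push_cast; ring_nf
        · by_cases h2 : d.getD x 0 - 1 ≤ (t.count x : Int)
          · rw [if_neg hm, if_pos h2, if_neg (by omega), if_pos (by push_cast; omega)]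
          · rw [if_neg hm, if_neg h2, if_neg (by omega), if_neg (by push_cast; omega)]
            push_cast; ring_nf
      · simp only [Function.comp_apply, beq_iff_eq, hpk, if_false]
        have hcnt : (x :: t).count p.1 = t.count p.1 := by
          simp [List.count_cons, Ne.symm hpk]
        simp only [entryF, PySem.Dict.getD_insert, if_neg hpk, hcnt]

theorem erase_eq_self_of_get?_none (d : PySem.Dict String Int) (k : String)
    (h : d.get? k = none) : d.erase k = d := by
  apply PySem.Dict.ext
  simp only [PySem.Dict.erase]
  rw [List.filter_eq_self.mpr]
  intro p hp
  simp only [PySem.Dict.get?, Option.map_eq_none_iff, List.find?_eq_none] at h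
  simpa using h p hp

-- B's per-entry decision as a filterMap entry
def entryB (xs : List String) (p : String × Int) : Option (String × Int) :=
  if (xs.count p.1 : Int) = 0 then some p
  else if (xs.count p.1 : Int) < p.2 then some (p.1, p.2 - (xs.count p.1 : Int))
  else none

theorem foldB_char (xs : List String) (l : List (String × Int)) (nc : PySem.Dict String Int)
    (hfresh : ∀ p ∈ l, nc.contains p.1 = false) (hnd : (l.map Prod.fst).Nodup) :
    (l.foldl (fun (nc : PySem.Dict String Int) kv =>
        if (xs.count kv.1 : Int) = 0 then nc.insert kv.1 kv.2
        else if (xs.count kv.1 : Int) < kv.2 then nc.insert kv.1 (kv.2 - (xs.count kv.1 : Int))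
        else nc) nc).items = nc.items ++ l.filterMap (entryB xs) := by
  induction l generalizing nc with
  | nil => simp
  | cons p t ih =>
    simp only [List.map_cons, List.nodup_cons] at hnd
    obtain ⟨hp, hnd'⟩ := hnd
    have hfr : nc.contains p.1 = false := hfresh p (by simp)
    have hins : ∀ (v : Int), ∀ q ∈ t, (nc.insert p.1 v).contains q.1 = false := by
      intro v q hq
      rw [PySem.Dict.contains_insert]
      have : q.1 ≠ p.1 := by
        intro h; exact hp (h ▸ List.mem_map_of_mem hq)
      simp [this, hfresh q (List.mem_cons_of_mem _ hq)]
    simp only [List.foldl_cons, List.filterMap_cons, entryB]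
    by_cases h0 : (xs.count p.1 : Int) = 0
    · rw [if_pos h0, if_pos h0, ih _ (hins _) hnd',
        PySem.Dict.items_insert_of_not_contains _ _ hfr]
      simp [entryB, h0]
    · by_cases h1 : (xs.count p.1 : Int) < p.2
      · rw [if_neg h0, if_pos h1, if_neg h0, if_pos h1, ih _ (hins _) hnd',
          PySem.Dict.items_insert_of_not_contains _ _ hfr]
        simp [entryB, h0, h1]
      · have hfr' : ∀ q ∈ t, nc.contains q.1 = false :=
          fun q hq => hfresh q (List.mem_cons_of_mem _ hq)
        rw [if_neg h0, if_neg h1, if_neg h0, if_neg h1, ih _ hfr' hnd']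
        simp [entryB, h0, h1]

theorem entry_none_iff (l : List (String × Int)) (xs : List String)
    (hnd : (l.map Prod.fst).Nodup) (p : String × Int) (hp : p ∈ l) :
    entryF (PySem.Dict.mk l) xs p = none ↔ entryB xs p = none := by
  have hget : (PySem.Dict.mk l).getD p.1 0 = p.2 :=
    PySem.Dict.getD_of_mem_items (d := PySem.Dict.mk l) (by exact hp) (by exact hnd) 0
  by_cases hc : xs.count p.1 = 0
  · simp [entryF, entryB, hc]
  · have hc' : ¬((xs.count p.1 : Int) = 0) := by exact_mod_cast hc
    by_cases hlt : (xs.count p.1 : Int) < p.2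
    · simp [entryF, entryB, hc, hc', hget, not_le.mpr hlt]
    · simp [entryF, entryB, hc, hc', hget, not_lt.mp hlt]

-- ===== VERDICT (by name: the statement is the Claim_ definition above) =====
theorem end_path_sync_lock_spec : Claim_equal_end_path_sync_lock := by
  intro lock_counts job_ids _ hpre
  unfold Spec_end_path_sync_lock end_path_sync_lock end_path_sync_lock_alt
  by_cases h : normalize_path_sync_job_ids job_ids = []
  · simp [h]
  · simp only [if_neg h]
    have hfunA : (fun (st : PySem.Dict String Int × List String) job_id =>
        (let count := st.1.getD job_id 0
         if count ≤ 1 then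
           match st.1.pop? job_id with
           | some (_, d') => d'
           | none => st.1
         else st.1.insert job_id (count - 1),
         st.2 ++ [job_id]))
        = (fun (st : PySem.Dict String Int × List String) job_id =>
            (stepGrp st.1 job_id 1, st.2 ++ [job_id])) := by
      funext st j
      dsimp only [stepGrp]
      cases hp : st.1.pop? j with
      | none =>
        simp only [hp]
        rw [erase_eq_self_of_get?_none st.1 j (by simpa [PySem.Dict.pop?] using hp)]
      | some v =>
        obtain ⟨w, d'⟩ := v
        have hd : d' = st.1.erase j := by
          simp only [PySem.Dict.pop?, Option.map_eq_some_iff] at hp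
          obtain ⟨u, _, hu⟩ := hp
          exact (congrArg Prod.snd hu).symm
        simp only [hp, hd]
    rw [hfunA]
    rw [PySem.List.foldl_prod_mk (fun (d : PySem.Dict String Int) j => stepGrp d j 1)
        (fun (l : List String) j => l ++ [j]) (normalize_path_sync_job_ids job_ids)
        (PySem.Dict.mk lock_counts) []]
    rw [PySem.List.foldl_append_singleton, List.nil_append]
    rw [seq_char (normalize_path_sync_job_ids job_ids) (PySem.Dict.mk lock_counts)]
    have hocc : ∀ k : String, ((normalize_path_sync_job_ids job_ids).foldl
        (fun d x => d.insert x (d.getD x 0 + 1)) PySem.Dict.empty).getD k 0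
        = ((normalize_path_sync_job_ids job_ids).count k : Int) := by
      intro k
      rw [PySem.Dict.foldl_insert_getD_add_one_eq_counter, PySem.Dict.getD_counter]
    simp only [hocc]
    refine Prod.ext rfl ?_
    show decide _ = decide _
    rw [decide_eq_decide]
    simp only [PySem.Dict.size]
    rw [foldB_char (normalize_path_sync_job_ids job_ids) ((PySem.Dict.mk lock_counts).items)
        PySem.Dict.empty (fun p _ => PySem.Dict.contains_empty p.1) hpre]
    show (List.filterMap _ lock_counts).length = 0 ↔ ([] ++ List.filterMap _ lock_counts).length = 0
    rw [List.nil_append, List.length_eq_zero_iff, List.length_eq_zero_iff,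
      List.filterMap_eq_nil_iff, List.filterMap_eq_nil_iff]
    exact ⟨fun H p hp => (entry_none_iff lock_counts _ hpre p hp).mp (H p hp),
           fun H p hp => (entry_none_iff lock_counts _ hpre p hp).mpr (H p hp)⟩
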